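-- pv_equiv track=rewrite | github.com/uttambodara/KeyLogger | log_reader.py | createP
-- ===== SOURCE A (Python) =====
-- def createP(log_file):
--     P = []
--     for line in log_file:
--         if 'INFO' in line and len(line) == 47 or len(line) == 48:
--             P.append(1)
--         else:
--             P.append(0)
--     P_copy = P.copy()
--     for i in range(len(P)-2):
--         f_char, s_char, t_char = P[i:i+3]
--         if (f_char, s_char, t_char) == (1, 1, 1):
--             P_copy[i+1] = -1
--     return P_copy
-- ===== SOURCE B (Python) =====
-- def _emit(run):
--     # output block for a maximal run of `run` consecutive 1s:
--     # interior positions of a run of length >= 3 become -1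
--     if run == 0:
--         return []
--     if run == 1:
--         return [1]
--     return [1] + [-1] * (run - 2) + [1]
--
--
-- def createP(log_file):
--     P = [1 if 'INFO' in line and len(line) == 47 or len(line) == 48 else 0
--          for line in log_file]
--     res = []
--     run = 0
--     for x in P:
--         if x == 1:
--             run += 1
--         else:
--             res.extend(_emit(run))
--             res.append(x)
--             run = 0
--     res.extend(_emit(run))
--     return res
-- ===== Notes on version B (the rewrite author's own statement) =====
-- stated objective: alternative
-- what changed: Replaces the second pass (index loop sliding a 3-window over P and mutating a copy at i+1) with a single run-length grouping pass that emits each maximal run of 1s as 1,(-1)*,1 with interior positions marked; no copy and no indexing.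
import Mathlib
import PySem

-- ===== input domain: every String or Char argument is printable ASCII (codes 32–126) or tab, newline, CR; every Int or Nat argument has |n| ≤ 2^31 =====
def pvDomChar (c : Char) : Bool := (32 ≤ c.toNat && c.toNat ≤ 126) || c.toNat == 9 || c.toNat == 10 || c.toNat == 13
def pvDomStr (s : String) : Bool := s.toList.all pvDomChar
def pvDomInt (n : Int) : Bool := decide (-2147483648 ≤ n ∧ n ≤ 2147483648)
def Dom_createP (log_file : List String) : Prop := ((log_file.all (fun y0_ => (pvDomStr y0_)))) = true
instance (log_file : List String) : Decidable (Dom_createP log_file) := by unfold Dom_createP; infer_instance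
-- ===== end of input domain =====

-- B replaces the sliding-3-window pass over a copy with a single run-length grouping pass; no speed claim.

-- shared phase-one marking (the identical expression occurs in both Pythons)
def markLine (line : String) : Int :=
  if (PySem.Str.isIn "INFO" line && PySem.Str.len line == 47) || PySem.Str.len line == 48 then 1 else 0

-- ===== PORT A =====
-- step of A's second loop: read P[i:i+3]; on (1,1,1) write -1 at i+1 of the copy
def stepA (P : List Int) (Pc : List Int) (i : Int) : List Int :=
  match PySem.List.slice P (some i) (some (i + 3)) with
  | [f_char, s_char, t_char] =>
      if (f_char, s_char, t_char) = ((1 : Int), 1, 1) then PySem.List.pySetD Pc (i + 1) (-1) else Pc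
  | _ => Pc  -- unreachable: the slice always has 3 elements for i in range(len(P)-2)

def createP (log_file : List String) : List Int :=
  let P := log_file.foldl (fun P line => P ++ [markLine line]) []
  let P_copy := P
  (PySem.List.pyRange 0 ((P.length : Int) - 2) 1).foldl (fun Pc i => stepA P Pc i) P_copy

-- ===== PORT B =====
def emitRun (run : Nat) : List Int :=
  if run = 0 then []
  else if run = 1 then [1]
  else [1] ++ List.replicate (run - 2) (-1) ++ [1]

def stepB (acc : List Int × Nat) (x : Int) : List Int × Nat :=
  if x = 1 then (acc.1, acc.2 + 1) else (acc.1 ++ emitRun acc.2 ++ [x], 0)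

def createP_alt (log_file : List String) : List Int :=
  let P := log_file.map markLine
  let st := P.foldl stepB ([], 0)
  st.1 ++ emitRun st.2

-- ===== PRECONDITION & SPEC =====
def Spec_createP (log_file : List String) (out : List Int) : Prop := out = createP_alt log_file
instance (log_file : List String) (out : List Int) : Decidable (Spec_createP log_file out) := by unfold Spec_createP; infer_instance

-- ===== CLAIM (what is proved, stated in full; the proofs are below) =====
def Claim_equal_createP : Prop := ∀ (log_file : List String), Dom_createP log_file → Spec_createP log_file (createP log_file)

-- ===== LEMMAS AND PROOFS =====

-- common reference: one pass with a boolean "previous element was 1" and one-element lookahead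
def spec2 : Bool → List Int → List Int
  | _, [] => []
  | prev, a :: rest =>
      (if prev = true ∧ a = 1 ∧ rest.head? = some 1 then (-1 : Int) else a) :: spec2 (a == 1) rest

theorem length_spec2 (prev : Bool) (P : List Int) : (spec2 prev P).length = P.length := by
  induction P generalizing prev with
  | nil => rfl
  | cons a rest ih => simp [spec2, ih]

theorem head?_eq_some_one_iff (rest : List Int) : rest.head? = some 1 ↔ rest.getD 0 0 = 1 := by
  cases rest <;> simp

theorem spec2_getD (P : List Int) (prev : Bool) (j : Nat) (hj : j < P.length) :
    (spec2 prev P).getD j 0 =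
      if (if j = 0 then prev = true else P.getD (j - 1) 0 = 1) ∧ P.getD j 0 = 1 ∧ P.getD (j + 1) 0 = 1
      then -1 else P.getD j 0 := by
  induction P generalizing prev j with
  | nil => simp at hj
  | cons a rest ih =>
    cases j with
    | zero =>
      simp only [spec2, List.getD_cons_zero]
      by_cases hp : prev = true
      · by_cases ha : a = 1
        · rcases Classical.em (rest.head? = some 1) with hh | hh
          · have h0 : rest.getD 0 0 = 1 := (head?_eq_some_one_iff rest).1 hh
            rw [List.getD_eq_getElem?_getD] at h0
            simp [hp, ha, hh, h0]
          · have h0 : ¬ rest.getD 0 0 = 1 := fun h => hh ((head?_eq_some_one_iff rest).2 h)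
            rw [List.getD_eq_getElem?_getD] at h0
            simp [hp, ha, hh, h0]
        · simp [ha]
      · simp [hp]
    | succ k =>
      have hk : k < rest.length := by simpa using hj
      simp only [spec2, List.getD_cons_succ]
      rw [ih (a == 1) k hk]
      cases k with
      | zero =>
        by_cases ha : a = 1 <;> simp [ha]
      | succ m =>
        simp

-- A-side: characterization of the window-writing fold
theorem winA_char (P : List Int) (m : Nat) (hm : m + 2 ≤ P.length) :
    ((List.range m).foldl (fun Pc (k : Nat) => stepA P Pc (k : Int)) P).length = P.length ∧
    ∀ j : Nat, ((List.range m).foldl (fun Pc (k : Nat) => stepA P Pc (k : Int)) P).getD j 0 =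
      if 1 ≤ j ∧ j < m + 1 ∧ P.getD (j - 1) 0 = 1 ∧ P.getD j 0 = 1 ∧ P.getD (j + 1) 0 = 1
      then -1 else P.getD j 0 := by
  induction m with
  | zero =>
    refine ⟨rfl, fun j => ?_⟩
    simp only [List.range_zero, List.foldl_nil]
    rw [if_neg]; omega
  | succ m ih =>
    have hm' : m + 2 ≤ P.length := by omega
    obtain ⟨hlen, hget⟩ := ih hm'
    rw [List.range_succ, List.foldl_append, List.foldl_cons, List.foldl_nil]
    set W := (List.range m).foldl (fun Pc (k : Nat) => stepA P Pc (k : Int)) P with hW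
    have hslice : PySem.List.slice P (some (m : Int)) (some ((m : Int) + 3)) =
        [P.getD m 0, P.getD (m + 1) 0, P.getD (m + 2) 0] := by
      have h3 : ((m : Int) + 3) = ((m + 3 : Nat) : Int) := by push_cast; ring
      rw [h3, PySem.List.slice_natCast]
      have hm0 : m < P.length := by omega
      have hm1 : m + 1 < P.length := by omega
      have hm2 : m + 2 < P.length := by omega
      rw [List.getD_eq_getElem _ _ hm0, List.getD_eq_getElem _ _ hm1, List.getD_eq_getElem _ _ hm2]
      rw [show m + 3 - m = 3 from by omega]
      rw [List.drop_eq_getElem_cons hm0]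
      rw [show P.drop (m + 1) = P[m+1] :: P.drop (m + 2) from List.drop_eq_getElem_cons hm1]
      rw [show P.drop (m + 2) = P[m+2] :: P.drop (m + 3) from List.drop_eq_getElem_cons hm2]
      simp only [List.take_succ_cons, List.take_zero]
    by_cases hc : P.getD m 0 = 1 ∧ P.getD (m + 1) 0 = 1 ∧ P.getD (m + 2) 0 = 1
    · have hset : stepA P W (m : Int) = W.set (m + 1) (-1) := by
        simp only [stepA, hslice]
        rw [if_pos (show (P.getD m 0, P.getD (m + 1) 0, P.getD (m + 2) 0) = ((1 : Int), 1, 1)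
            from by rw [hc.1, hc.2.1, hc.2.2]),
          show ((m : Int) + 1) = ((m + 1 : Nat) : Int) by push_cast; ring,
          PySem.List.pySetD_natCast]
      rw [hset]
      refine ⟨by simp [hlen], fun j => ?_⟩
      by_cases hj : j = m + 1
      · subst hj
        rw [List.getD_eq_getElem?_getD, List.getElem?_set_self (by omega), Option.getD_some]
        rw [if_pos ⟨by omega, by omega, by simpa using hc.1, hc.2.1, hc.2.2⟩]
      · rw [List.getD_eq_getElem?_getD, List.getElem?_set_ne (by omega), ← List.getD_eq_getElem?_getD,
          hget j]
        by_cases h1 : 1 ≤ j ∧ j < m + 1 ∧ P.getD (j - 1) 0 = 1 ∧ P.getD j 0 = 1 ∧ P.getD (j + 1) 0 = 1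
        · rw [if_pos h1, if_pos ⟨h1.1, by omega, h1.2.2⟩]
        · rw [if_neg h1, if_neg (by rintro ⟨a, b, c⟩; exact h1 ⟨a, by omega, c⟩)]
    · have hset : stepA P W (m : Int) = W := by
        rw [stepA, hslice]
        have : ¬ ((P.getD m 0, P.getD (m + 1) 0, P.getD (m + 2) 0) = ((1 : Int), 1, 1)) := by
          simpa [Prod.ext_iff] using hc
        simp only [this, if_false]
      rw [hset]
      refine ⟨hlen, fun j => ?_⟩
      rw [hget j]
      by_cases h1 : 1 ≤ j ∧ j < m + 1 ∧ P.getD (j - 1) 0 = 1 ∧ P.getD j 0 = 1 ∧ P.getD (j + 1) 0 = 1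
      · rw [if_pos h1, if_pos ⟨h1.1, by omega, h1.2.2⟩]
      · rw [if_neg h1, if_neg]
        rintro ⟨a, b, c, d, e⟩
        by_cases hj : j = m + 1
        · subst hj
          exact hc ⟨by simpa using c, d, e⟩
        · exact h1 ⟨a, by omega, c, d, e⟩

-- A equals spec2 false on the marked list
theorem createP_eq_spec2 (log_file : List String) :
    createP log_file = spec2 false (log_file.map markLine) := by
  rw [createP]
  rw [PySem.List.foldl_append_singleton_eq_map]
  simp only [List.nil_append]
  set P := log_file.map markLine with hP
  have hrange : PySem.List.pyRange 0 ((P.length : Int) - 2) 1 =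
      (List.range (P.length - 2)).map (fun k : Nat => (k : Int)) := by
    rw [PySem.List.pyRange_one]
    have : (((P.length : Int) - 2) - 0).toNat = P.length - 2 := by omega
    rw [this]
    apply List.map_congr_left
    intro k _
    simp
  rw [hrange, List.foldl_map]
  by_cases hn : 2 ≤ P.length
  · obtain ⟨hlen, hget⟩ := winA_char P (P.length - 2) (by omega)
    apply List.ext_getElem
    · rw [hlen, length_spec2]
    · intro i h1 h2
      have hi : i < P.length := by rw [length_spec2] at h2; exact h2
      have lhs := hget i
      have rhs := spec2_getD P false i hi
      rw [List.getD_eq_getElem _ _ h1] at lhs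
      rw [List.getD_eq_getElem _ _ h2] at rhs
      rw [lhs, rhs]
      have hcond : ((if i = 0 then (false = true) else P.getD (i - 1) 0 = 1) ∧
            P.getD i 0 = 1 ∧ P.getD (i + 1) 0 = 1)
          ↔ (1 ≤ i ∧ i < (P.length - 2) + 1 ∧ P.getD (i - 1) 0 = 1 ∧ P.getD i 0 = 1 ∧
            P.getD (i + 1) 0 = 1) := by
        constructor
        · rintro ⟨h1', h2', h3'⟩
          by_cases hi0 : i = 0
          · rw [if_pos hi0] at h1'
            exact absurd h1' (by simp)
          · rw [if_neg hi0] at h1'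
            have hb : i + 1 < P.length := by
              by_contra hh
              rw [List.getD_eq_default _ _ (by omega)] at h3'
              norm_num at h3'
            exact ⟨by omega, by omega, h1', h2', h3'⟩
        · rintro ⟨h1', h2', h3', h4', h5'⟩
          refine ⟨?_, h4', h5'⟩
          rw [if_neg (by omega)]
          exact h3'
      exact if_congr hcond.symm rfl rfl
  · -- fewer than 2 lines: the range is empty and spec2 is the identity
    have hempty : (List.range (P.length - 2)) = [] := by
      have : P.length - 2 = 0 := by omega
      rw [this, List.range_zero]
    rw [hempty, List.foldl_nil]
    interval_cases h : P.length
    · rw [List.length_eq_zero_iff.mp h]; rfl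
    · obtain ⟨a, ha⟩ := List.length_eq_one_iff.mp h
      rw [ha]; simp [spec2]

-- B-side lemmas
theorem spec2_true_eq_false (rest : List Int) (h : rest.head? ≠ some 1) :
    spec2 true rest = spec2 false rest := by
  cases rest with
  | nil => rfl
  | cons a r =>
    have ha : a ≠ 1 := by simpa using h
    simp [spec2, ha]

theorem spec2_true_run (k : Nat) (rest : List Int) (h : rest.head? ≠ some 1) :
    spec2 true (List.replicate (k + 1) 1 ++ rest) =
      List.replicate k (-1) ++ 1 :: spec2 false rest := by
  induction k with
  | zero =>
    rw [show List.replicate (0 + 1) (1 : Int) = [1] from rfl, List.singleton_append, spec2]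
    simp only [beq_self_eq_true]
    rw [spec2_true_eq_false rest h]
    simp [h]
  | succ k ih =>
    rw [show List.replicate (k + 2) (1 : Int) = 1 :: List.replicate (k + 1) 1 from rfl,
      List.cons_append, spec2]
    simp only [beq_self_eq_true]
    rw [ih]
    simp [List.replicate_succ]

theorem spec2_emit (n : Nat) (rest : List Int) (h : rest.head? ≠ some 1) :
    spec2 false (List.replicate n 1 ++ rest) = emitRun n ++ spec2 false rest := by
  match n with
  | 0 => simp [emitRun]
  | 1 =>
    simp only [List.replicate_one, List.singleton_append, spec2, beq_self_eq_true]
    rw [spec2_true_eq_false rest h]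
    simp [h, emitRun]
  | (k + 2) =>
    rw [show List.replicate (k + 2) (1 : Int) = 1 :: List.replicate (k + 1) 1 from rfl,
      List.cons_append, spec2]
    simp only [beq_self_eq_true]
    rw [spec2_true_run k rest h]
    simp [emitRun]

theorem bfold (rest : List Int) (res : List Int) (run : Nat) :
    (rest.foldl stepB (res, run)).1 ++ emitRun (rest.foldl stepB (res, run)).2 =
      res ++ spec2 false (List.replicate run 1 ++ rest) := by
  induction rest generalizing res run with
  | nil =>
    rw [List.foldl_nil, spec2_emit run [] (by simp)]
    simp [spec2]
  | cons x rest ih =>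
    rw [List.foldl_cons]
    by_cases hx : x = 1
    · rw [show stepB (res, run) x = (res, run + 1) by simp [stepB, hx], ih]
      subst hx
      congr 1
      rw [show List.replicate (run + 1) (1 : Int) = List.replicate run 1 ++ [1] from
        List.replicate_succ' .., List.append_assoc]
      rfl
    · rw [show stepB (res, run) x = (res ++ emitRun run ++ [x], 0) by simp [stepB, hx], ih]
      rw [spec2_emit run (x :: rest) (by simpa using hx)]
      have hxb : (x == 1) = false := beq_eq_false_iff_ne.mpr hx
      simp [spec2, hx, hxb]

theorem createP_alt_eq_spec2 (log_file : List String) :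
    createP_alt log_file = spec2 false (log_file.map markLine) := by
  rw [createP_alt]
  have := bfold (log_file.map markLine) [] 0
  simpa using this

-- ===== VERDICT (by name: the statement is the Claim_ definition above) =====
theorem createP_spec : Claim_equal_createP := by
  intro log_file _
  unfold Spec_createP
  rw [createP_eq_spec2, createP_alt_eq_spec2]
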